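-- pv_equiv track=rewrite | github.com/diothor/dcp-python | problems/string_problems/problem_766.py | xs_before_ys_flips
-- ===== SOURCE A (Python) =====
-- def xs_before_ys_flips(s: str) -> int:
--     flip_count = 0
--     x_count = 0
--     y_count = 0
--     for index, letter in enumerate(s):
--         if letter == 'x' and y_count > 0:
--             x_count += 1
--         elif letter == 'y' and x_count == 0:
--             y_count += 1
--         elif letter == 'y' and x_count > 0:
--             flip_count += min(x_count, y_count)
--             x_count, y_count = 0, 1
--     else:
--         if x_count > 0 and y_count > 0:
--             flip_count += min(x_count, y_count)
--         return flip_count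
-- ===== SOURCE B (Python) =====
-- def xs_before_ys_flips(s: str) -> int:
--     t = [c for c in s if c == 'x' or c == 'y']
--     runs = []
--     if t:
--         cur, cnt = t[0], 1
--         for c in t[1:]:
--             if c == cur:
--                 cnt += 1
--             else:
--                 runs.append((cur, cnt))
--                 cur, cnt = c, 1
--         runs.append((cur, cnt))
--     total = 0
--     for (c1, n1), (c2, n2) in zip(runs, runs[1:]):
--         if c1 == 'y' and c2 == 'x':
--             total += min(n1, n2)
--     return total
-- ===== Notes on version B (the rewrite author's own statement) =====
-- stated objective: alternative
-- what changed: Replaces A's three-counter state machine (flip/x/y counts with for-else epilogue) by filtering to x/y chars, run-length grouping them, and summing min over adjacent (y-run, x-run) pairs.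
import Mathlib
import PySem

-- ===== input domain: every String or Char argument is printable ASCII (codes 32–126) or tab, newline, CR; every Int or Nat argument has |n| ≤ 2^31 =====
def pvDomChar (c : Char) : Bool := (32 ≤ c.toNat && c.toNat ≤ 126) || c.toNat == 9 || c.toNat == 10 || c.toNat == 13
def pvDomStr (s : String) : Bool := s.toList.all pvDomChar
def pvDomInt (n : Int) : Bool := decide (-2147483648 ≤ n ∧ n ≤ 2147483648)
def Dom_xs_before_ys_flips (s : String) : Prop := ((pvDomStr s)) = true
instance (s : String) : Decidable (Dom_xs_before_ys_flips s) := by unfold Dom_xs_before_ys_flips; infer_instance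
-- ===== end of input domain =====

-- B replaces A's 3-counter state machine by run-length grouping of the x/y characters and a
-- sum of min over adjacent (y-run, x-run) pairs (objective: alternative decomposition, same cost).

-- ===== PORT A =====
-- the for-loop over enumerate(s) (index unused) with state (flip_count, x_count, y_count);
-- the for-else epilogue is the [] case
def xbLoop : List Char → Int → Int → Int → Int
  | [], f, x, y => if x > 0 ∧ y > 0 then f + min x y else f
  | c :: t, f, x, y =>
    if c = 'x' ∧ y > 0 then xbLoop t f (x + 1) y
    else if c = 'y' ∧ x = 0 then xbLoop t f x (y + 1)
    else if c = 'y' ∧ x > 0 then xbLoop t (f + min x y) 0 1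
    else xbLoop t f x y

def xs_before_ys_flips (s : String) : Int := xbLoop s.toList 0 0 0

-- ===== PORT B =====
-- run-length groups: xbRunsAux carries the current run (cur, cnt) like Source B's loop
def xbRunsAux (c : Char) (n : Nat) : List Char → List (Char × Nat)
  | [] => [(c, n)]
  | d :: t => if d = c then xbRunsAux c (n + 1) t else (c, n) :: xbRunsAux d 1 t

def xbRuns : List Char → List (Char × Nat)
  | [] => []
  | c :: t => xbRunsAux c 1 t

-- Source B's zip(runs, runs[1:]) accumulation
def xbPairSum : List (Char × Nat) → Int
  | (c1, _n1) :: (c2, n2) :: r =>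
    (if c1 = 'y' ∧ c2 = 'x' then ((min _n1 n2 : Nat) : Int) else 0) + xbPairSum ((c2, n2) :: r)
  | _ => 0

def xs_before_ys_flips_alt (s : String) : Int :=
  xbPairSum (xbRuns (s.toList.filter (fun c => c = 'x' || c = 'y')))

-- ===== PRECONDITION & SPEC =====
def Spec_xs_before_ys_flips (s : String) (out : Int) : Prop := out = xs_before_ys_flips_alt s
instance (s : String) (out : Int) : Decidable (Spec_xs_before_ys_flips s out) := by unfold Spec_xs_before_ys_flips; infer_instance

-- ===== CLAIM (what is proved, stated in full; the proofs are below) =====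
def Claim_equal_xs_before_ys_flips : Prop := ∀ (s : String), Dom_xs_before_ys_flips s → Spec_xs_before_ys_flips s (xs_before_ys_flips s)

-- ===== LEMMAS AND PROOFS =====

-- characters other than 'x'/'y' are no-ops for A's loop
theorem xbLoop_filter (l : List Char) : ∀ f x y : Int,
    xbLoop l f x y = xbLoop (l.filter (fun c => c = 'x' || c = 'y')) f x y := by
  induction l with
  | nil => intro f x y; simp
  | cons c t ih =>
    intro f x y
    by_cases hx : c = 'x'
    · subst hx; simp [xbLoop, ih]
    · by_cases hy : c = 'y'
      · subst hy; simp [xbLoop, ih]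
      · simp [List.filter, hx, hy, xbLoop, ih]

-- a run whose character is not 'y' contributes nothing as the left member of a pair
theorem xbPairSum_not_y (c : Char) (n : Nat) (r : List (Char × Nat)) (h : c ≠ 'y') :
    xbPairSum ((c, n) :: r) = xbPairSum r := by
  cases r with
  | nil => simp [xbPairSum]
  | cons p r' => cases p; simp [xbPairSum, h]

-- main invariant: A's loop state corresponds to pending runs prepended to the grouping of the rest
theorem xb_inv (l : List Char) (hl : ∀ c ∈ l, c = 'x' ∨ c = 'y') : ∀ f : Int,
    (xbLoop l f 0 0 = f + xbPairSum (xbRuns l))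
  ∧ (∀ a : Nat, xbLoop l f 0 0 = f + xbPairSum (xbRunsAux 'x' (a + 1) l))
  ∧ (∀ b : Nat, xbLoop l f 0 ((b : Int) + 1) = f + xbPairSum (xbRunsAux 'y' (b + 1) l))
  ∧ (∀ a b : Nat, xbLoop l f ((a : Int) + 1) ((b : Int) + 1)
        = f + xbPairSum (('y', b + 1) :: xbRunsAux 'x' (a + 1) l)) := by
  induction l with
  | nil =>
    intro f
    refine ⟨by simp [xbLoop, xbRuns, xbPairSum], by simp [xbLoop, xbRunsAux, xbPairSum], ?_, ?_⟩
    · intro b; simp [xbLoop, xbRunsAux, xbPairSum]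
    · intro a b
      simp [xbLoop, xbRunsAux, xbPairSum]
      omega
  | cons c t ih =>
    have hct : ∀ d ∈ t, d = 'x' ∨ d = 'y' := fun d hd => hl d (List.mem_cons_of_mem _ hd)
    intro f
    rcases hl c (List.mem_cons_self) with hc | hc <;> subst hc
    · -- c = 'x'
      refine ⟨?_, ?_, ?_, ?_⟩
      · have := ((ih hct f).2.1) 0
        simpa [xbLoop, xbRuns] using this
      · intro a
        have := ((ih hct f).2.1) (a + 1)
        simpa [xbLoop, xbRunsAux] using this
      · intro b
        have h4 := ((ih hct f).2.2.2) 0 b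
        have : xbLoop ('x' :: t) f 0 ((b : Int) + 1) = xbLoop t f 1 ((b : Int) + 1) := by
          simp [xbLoop]
        rw [this]
        have h1 : ((0 : Nat) : Int) + 1 = (1 : Int) := by norm_num
        rw [h1] at h4
        rw [h4]
        simp [xbRunsAux]
      · intro a b
        have h4 := ((ih hct f).2.2.2) (a + 1) b
        have : xbLoop ('x' :: t) f ((a : Int) + 1) ((b : Int) + 1)
            = xbLoop t f ((a : Int) + 1 + 1) ((b : Int) + 1) := by
          simp [xbLoop]
        rw [this]
        have he : ((a : Int) + 1 + 1) = (((a + 1 : Nat) : Int) + 1) := by push_cast; ring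
        rw [he, h4]
        simp [xbRunsAux]
    · -- c = 'y'
      refine ⟨?_, ?_, ?_, ?_⟩
      · have := ((ih hct f).2.2.1) 0
        have hz : ((0 : Nat) : Int) + 1 = (1 : Int) := by norm_num
        rw [hz] at this
        simpa [xbLoop, xbRuns] using this
      · intro a
        have := ((ih hct f).2.2.1) 0
        have hz : ((0 : Nat) : Int) + 1 = (1 : Int) := by norm_num
        rw [hz] at this
        have hstep : xbLoop ('y' :: t) f 0 0 = xbLoop t f 0 1 := by simp [xbLoop]
        rw [hstep, this, xbRunsAux]
        simp only [if_neg (by decide : ¬ ('y' : Char) = 'x')]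
        rw [xbPairSum_not_y 'x' (a + 1) _ (by decide)]
      · intro b
        have := ((ih hct f).2.2.1) (b + 1)
        have hstep : xbLoop ('y' :: t) f 0 ((b : Int) + 1) = xbLoop t f 0 ((b : Int) + 1 + 1) := by
          simp [xbLoop]
        have he : ((b : Int) + 1 + 1) = (((b + 1 : Nat) : Int) + 1) := by push_cast; ring
        rw [hstep, he, this]
        simp [xbRunsAux]
      · intro a b
        have h3 := ((ih (hct) (f + min ((a : Int) + 1) ((b : Int) + 1))).2.2.1) 0
        have hz : ((0 : Nat) : Int) + 1 = (1 : Int) := by norm_num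
        rw [hz] at h3
        have hstep : xbLoop ('y' :: t) f ((a : Int) + 1) ((b : Int) + 1)
            = xbLoop t (f + min ((a : Int) + 1) ((b : Int) + 1)) 0 1 := by
          simp [xbLoop]; omega
        rw [hstep, h3]
        have hr : xbRunsAux 'x' (a + 1) ('y' :: t) = ('x', a + 1) :: xbRunsAux 'y' 1 t := by
          simp [xbRunsAux]
        rw [hr]
        have hps : xbPairSum (('y', b + 1) :: ('x', a + 1) :: xbRunsAux 'y' 1 t)
            = ((min (b + 1) (a + 1) : Nat) : Int) + xbPairSum (xbRunsAux 'y' 1 t) := by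
          rw [xbPairSum, xbPairSum_not_y 'x' (a + 1) _ (by decide)]
          simp
        rw [hps]
        simp only [Nat.zero_add]
        push_cast
        omega

-- ===== VERDICT (by name: the statement is the Claim_ definition above) =====
theorem xs_before_ys_flips_spec : Claim_equal_xs_before_ys_flips := by
  intro s _
  unfold Spec_xs_before_ys_flips xs_before_ys_flips xs_before_ys_flips_alt
  rw [xbLoop_filter]
  have hl : ∀ c ∈ s.toList.filter (fun c => c = 'x' || c = 'y'), c = 'x' ∨ c = 'y' := by
    intro c hc
    have := List.of_mem_filter hc
    simpa using this
  have := (xb_inv _ hl 0).1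
  simpa using this
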